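-- pv_equiv track=rewrite | github.com/nuagenetworks/nuage-metroae | roles/vns-deploy/files/vsc_config.py | get_vsdlines
-- ===== SOURCE A (Python) =====
-- def get_vsdlines(fp):
--     vsd_lines = []
--     vsd_start = False
--     for line in fp:
--         # Removes any whitespace before and after the line
--         line = line.strip().split(" ")[0]
--         if (line.startswith("[vsds]")):
--             vsd_start = True
--
--         # Start appending lines only for [vsds] group
--         if (vsd_start and line):
--             if (line.startswith("[")):
--                 # Reset flag to False if group name is other than vscs
--                 if (not line.startswith("[vsds]")):
--                     vsd_start = False
--             else:
--                 vsd_lines.append(line)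
--
--     yield vsd_lines
-- ===== SOURCE B (Python) =====
-- def get_vsdlines(fp):
--     # Pass 1: group first tokens by their most recent section header.
--     sections = []
--     for line in fp:
--         tok = line.strip().split(" ")[0]
--         if not tok:
--             continue
--         if tok.startswith("["):
--             sections.append((tok, []))
--         elif sections:
--             sections[-1][1].append(tok)
--     # Pass 2: concatenate the tokens of every [vsds] section, in order.
--     out = []
--     for header, lines in sections:
--         if header.startswith("[vsds]"):
--             out.extend(lines)
--     yield out
-- ===== Notes on version B (the rewrite author's own statement) =====
-- stated objective: simpler
-- what changed: Replaces A's flag-driven single pass with a two-pass decomposition: first group first-tokens into a section table keyed by their latest header, then concatenate the groups whose header starts with '[vsds]'.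
import Mathlib
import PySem

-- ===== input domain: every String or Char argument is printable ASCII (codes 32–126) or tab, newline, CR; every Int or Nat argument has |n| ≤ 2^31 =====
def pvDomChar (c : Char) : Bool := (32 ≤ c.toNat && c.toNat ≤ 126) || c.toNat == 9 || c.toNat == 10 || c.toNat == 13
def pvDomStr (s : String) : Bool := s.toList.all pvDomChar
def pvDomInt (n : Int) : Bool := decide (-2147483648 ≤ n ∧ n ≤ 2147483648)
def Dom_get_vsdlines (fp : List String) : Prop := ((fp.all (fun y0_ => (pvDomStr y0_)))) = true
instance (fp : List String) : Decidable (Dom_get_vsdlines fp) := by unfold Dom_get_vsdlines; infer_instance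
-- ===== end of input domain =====

-- B replaces A's flag-driven single pass by build-sections-then-select (group tokens by
-- their latest header, then concatenate the [vsds] groups): a simpler two-pass decomposition.
-- (A is a generator yielding one list; ported as the one-element list of that list.)


-- ===== PORT A =====
-- line.strip().split(" ")[0]  (split(" ") is never empty, so [0] never raises)
def pvTok (line : String) : String :=
  PySem.List.pyGetD ((PySem.Str.split? (PySem.Str.strip line) " ").getD []) 0 ""

-- A's loop body over the state (vsd_lines, vsd_start)
def pvStepA (st : List String × Bool) (line : String) : List String × Bool :=
  let tok := pvTok line; let flag := if PySem.Str.startswith tok "[vsds]" then true else st.2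
  if flag && !(tok == "") then
    if PySem.Str.startswith tok "[" then
      (st.1, if !(PySem.Str.startswith tok "[vsds]") then false else flag)
    else (st.1 ++ [tok], flag)
  else (st.1, flag)

def get_vsdlines (fp : List String) : List (List String) :=
  [(fp.foldl pvStepA ([], false)).1]

-- ===== PORT B =====
-- sections[-1][1].append(tok): append tok to the last group's list (no-op on [])
def pvAppendLast : List (String × List String) → String → List (String × List String)
  | [], _ => []
  | [s], t => [(s.1, s.2 ++ [t])]
  | s :: r :: rest, t => s :: pvAppendLast (r :: rest) t

-- Source B's first pass: build the section table
def pvStepB (secs : List (String × List String)) (line : String) : List (String × List String) :=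
  let tok := pvTok line
  if tok == "" then secs
  else if PySem.Str.startswith tok "[" then secs ++ [(tok, [])]
  else pvAppendLast secs tok

def get_vsdlines_alt (fp : List String) : List (List String) :=
  let secs := fp.foldl pvStepB []
  [secs.foldl (fun out s => if PySem.Str.startswith s.1 "[vsds]" then out ++ s.2 else out) []]

-- ===== PRECONDITION & SPEC =====
def Spec_get_vsdlines (fp : List String) (out : List (List String)) : Prop := out = get_vsdlines_alt fp
instance (fp : List String) (out : List (List String)) : Decidable (Spec_get_vsdlines fp out) := by unfold Spec_get_vsdlines; infer_instance

-- ===== CLAIM (what is proved, stated in full; the proofs are below) =====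
def Claim_equal_get_vsdlines : Prop := ∀ (fp : List String), Dom_get_vsdlines fp → Spec_get_vsdlines fp (get_vsdlines fp)

-- ===== LEMMAS AND PROOFS =====

-- the lines B's second pass collects from a section table
def pvIsV (s : String × List String) : Bool := PySem.Str.startswith s.1 "[vsds]"
def pvSel (secs : List (String × List String)) : List String := (secs.filter pvIsV).flatMap (·.2)
-- whether the latest header is a [vsds] header = A's flag
def pvLastV (secs : List (String × List String)) : Bool := (secs.getLast?.map pvIsV).getD false

lemma pv_startswith_trans {tok : String}
    (h : PySem.Str.startswith tok "[vsds]" = true) : PySem.Str.startswith tok "[" = true := by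
  simp only [PySem.Str.startswith_eq, PySem.Chars.startswith_iff] at h ⊢
  exact List.IsPrefix.trans (by decide) h

lemma pv_startswith_ne_empty {tok : String}
    (h : PySem.Str.startswith tok "[" = true) : (tok == "") = false := by
  simp only [PySem.Str.startswith_eq, PySem.Chars.startswith_iff] at h
  rcases h with ⟨r, hr⟩
  cases htok : tok == "" with
  | false => rfl
  | true =>
    have : tok = "" := eq_of_beq htok
    subst this; simp at hr

lemma pvSel_append_header (secs : List (String × List String)) (tok : String) :
    pvSel (secs ++ [(tok, [])]) = pvSel secs := by
  simp only [pvSel, List.filter_append, List.flatMap_append]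
  cases h : pvIsV (tok, []) <;> simp [h]

lemma pvLastV_append_header (secs : List (String × List String)) (tok : String) :
    pvLastV (secs ++ [(tok, [])]) = PySem.Str.startswith tok "[vsds]" := by
  simp [pvLastV, pvIsV]

lemma pvIsV_push (s : String × List String) (t : String) : pvIsV (s.1, s.2 ++ [t]) = pvIsV s := rfl

lemma pvAppendLast_sel : ∀ (secs : List (String × List String)) (t : String),
    pvSel (pvAppendLast secs t) = pvSel secs ++ (if pvLastV secs then [t] else [])
  | [], t => by simp [pvAppendLast, pvSel, pvLastV]
  | [s], t => by
    simp only [pvAppendLast, pvSel, pvLastV, List.getLast?_singleton, Option.map_some,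
      Option.getD_some, List.filter_cons, List.filter_nil]
    rw [pvIsV_push]
    by_cases h : pvIsV s = true
    · simp [h]
    · simp [h]
  | s :: r :: rest, t => by
    have ih := pvAppendLast_sel (r :: rest) t
    have hl : pvLastV (s :: r :: rest) = pvLastV (r :: rest) := by
      simp [pvLastV, List.getLast?_cons_cons]
    show pvSel (s :: pvAppendLast (r :: rest) t) = _
    rw [hl]
    simp only [pvSel, List.filter_cons] at ih ⊢
    cases h : pvIsV s with
    | false => simpa [h] using ih
    | true => simp only [if_true, List.flatMap_cons]; rw [ih]; simp

lemma pvAppendLast_lastV : ∀ (secs : List (String × List String)) (t : String),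
    pvLastV (pvAppendLast secs t) = pvLastV secs
  | [], _ => rfl
  | [s], t => by
    simp only [pvAppendLast, pvLastV, List.getLast?_singleton, Option.map_some, Option.getD_some]
    exact pvIsV_push s t
  | s :: r :: rest, t => by
    have ih := pvAppendLast_lastV (r :: rest) t
    show pvLastV (s :: pvAppendLast (r :: rest) t) = _
    cases hA : pvAppendLast (r :: rest) t with
    | nil => cases rest <;> simp [pvAppendLast] at hA
    | cons a as =>
      rw [show pvLastV (s :: a :: as) = pvLastV (a :: as) by
        simp [pvLastV, List.getLast?_cons_cons], ← hA, ih]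
      simp [pvLastV, List.getLast?_cons_cons]

lemma pv_step (secs : List (String × List String)) (line : String) :
    pvStepA (pvSel secs, pvLastV secs) line = (pvSel (pvStepB secs line), pvLastV (pvStepB secs line)) := by
  simp only [pvStepA, pvStepB]
  cases h1 : PySem.Str.startswith (pvTok line) "[vsds]" with
  | true =>
    have h2 : PySem.Str.startswith (pvTok line) "[" = true := pv_startswith_trans h1
    have he : (pvTok line == "") = false := pv_startswith_ne_empty h2
    simp only [h1, h2, he, if_true, Bool.not_false, Bool.and_true, Bool.not_true,
      Bool.false_eq_true, if_false, pvSel_append_header, pvLastV_append_header]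
  | false =>
    cases h2 : PySem.Str.startswith (pvTok line) "[" with
    | true =>
      have he : (pvTok line == "") = false := pv_startswith_ne_empty h2
      simp only [h1, he, Bool.false_eq_true, if_false, Bool.not_false, Bool.and_true,
        if_true, pvSel_append_header, pvLastV_append_header]
      cases hf : pvLastV secs <;> simp
    | false =>
      cases he : (pvTok line == "") with
      | true =>
        simp only [Bool.false_eq_true, if_false, Bool.not_true, Bool.and_false, if_true]
      | false =>
        simp only [Bool.false_eq_true, if_false, Bool.not_false, Bool.and_true,
          pvAppendLast_sel, pvAppendLast_lastV]
        cases hf : pvLastV secs <;> simp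

lemma pv_inv (fp : List String) : ∀ secs : List (String × List String),
    fp.foldl pvStepA (pvSel secs, pvLastV secs) =
      (pvSel (fp.foldl pvStepB secs), pvLastV (fp.foldl pvStepB secs)) := by
  induction fp with
  | nil => intro secs; rfl
  | cons line rest ih =>
    intro secs
    rw [List.foldl_cons, List.foldl_cons, pv_step]
    exact ih _

lemma pv_flatMap_ite (l : List (String × List String)) :
    l.flatMap (fun s => if pvIsV s then s.2 else []) = (l.filter pvIsV).flatMap (·.2) := by
  induction l with
  | nil => rfl
  | cons s rest ih =>
    simp only [List.flatMap_cons, List.filter_cons]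
    cases h : pvIsV s <;> simp [ih]

lemma pv_second_pass (secs : List (String × List String)) :
    secs.foldl (fun out s => if PySem.Str.startswith s.1 "[vsds]" then out ++ s.2 else out) [] = pvSel secs := by
  have hfun : (fun (out : List String) (s : String × List String) =>
      if PySem.Str.startswith s.1 "[vsds]" then out ++ s.2 else out) =
      (fun out s => out ++ (if pvIsV s then s.2 else [])) := by
    funext out s
    by_cases h : pvIsV s = true
    · simp [pvIsV] at h; simp [h, pvIsV]
    · simp [pvIsV] at h; simp [h, pvIsV]
  rw [hfun, PySem.List.foldl_append_eq_flatMap, pv_flatMap_ite]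
  rfl

-- ===== VERDICT (by name: the statement is the Claim_ definition above) =====
theorem get_vsdlines_spec : Claim_equal_get_vsdlines := by
  intro fp _
  unfold Spec_get_vsdlines get_vsdlines get_vsdlines_alt
  have h := pv_inv fp []
  rw [show (pvSel [], pvLastV []) = (([] : List String), false) from rfl] at h
  simp only [h, pv_second_pass]
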